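-- pv_equiv track=rewrite | github.com/ehabhussein/EDAP | edap/scorer.py | _count_repeated
-- ===== SOURCE A (Python) =====
-- def _count_repeated(s: str) -> int:
--     """Count repeated consecutive characters."""
--     if len(s) < 2:
--         return 0
--
--     count = 0
--     for i in range(1, len(s)):
--         if s[i] == s[i - 1]:
--             count += 1
--     return count
-- ===== SOURCE B (Python) =====
-- def _count_repeated(s: str) -> int:
--     """Count repeated consecutive characters by summing (run length - 1) over maximal runs."""
--     total = 0
--     i = 0
--     n = len(s)
--     while i < n:
--         j = i
--         while j < n and s[j] == s[i]:
--             j += 1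
--         total += (j - i) - 1
--         i = j
--     return total
-- ===== Notes on version B (the rewrite author's own statement) =====
-- stated objective: alternative
-- what changed: B decomposes the string into maximal runs of equal characters with a two-level while loop and sums (run length - 1) per run, instead of A's single index loop comparing each position with its predecessor; no length guard is needed.
import Mathlib
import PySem

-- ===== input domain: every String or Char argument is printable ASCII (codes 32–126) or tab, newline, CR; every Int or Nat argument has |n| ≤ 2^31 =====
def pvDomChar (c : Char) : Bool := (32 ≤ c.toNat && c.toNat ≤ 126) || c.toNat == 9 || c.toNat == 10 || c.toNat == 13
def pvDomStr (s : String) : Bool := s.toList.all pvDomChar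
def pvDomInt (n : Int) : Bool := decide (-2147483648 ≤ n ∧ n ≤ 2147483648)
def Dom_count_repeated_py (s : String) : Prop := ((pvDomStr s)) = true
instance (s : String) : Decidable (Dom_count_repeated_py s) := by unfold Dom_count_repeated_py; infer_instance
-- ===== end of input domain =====

-- B is an alternative same-cost pass: it sums (run length - 1) over maximal runs instead of comparing adjacent indices.

-- ===== PORT A =====
-- literal port of A: length guard, then an index loop over range(1, len(s)) comparing s[i] with s[i-1]
def count_repeated_py (s : String) : Int :=
  if PySem.Str.len s < 2 then 0
  else
    (PySem.List.pyRange 1 (PySem.Str.len s) 1).foldl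
      (fun count i =>
        if PySem.Str.pyGet? s i == PySem.Str.pyGet? s (i - 1) then count + 1 else count) 0

-- ===== PORT B =====
-- inner while loop of B: consume the run of characters equal to c, returning (extra run length j-i-1, rest)
def pvRunSplit (c : Char) : List Char → Nat × List Char
  | [] => (0, [])
  | x :: xs =>
    if x == c then
      let p := pvRunSplit c xs
      (p.1 + 1, p.2)
    else (0, x :: xs)

theorem pvRunSplit_length (c : Char) (xs : List Char) :
    (pvRunSplit c xs).2.length ≤ xs.length := by
  induction xs with
  | nil => simp [pvRunSplit]
  | cons x xs ih =>
    by_cases h : (x == c) = true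
    · simp [pvRunSplit, h]; omega
    · simp [pvRunSplit, h]

-- outer while loop of B, advancing run by run and summing (run length - 1)
def pvAltGo : List Char → Int
  | [] => 0
  | c :: rest =>
    ((pvRunSplit c rest).1 : Int) + pvAltGo (pvRunSplit c rest).2
termination_by l => l.length
decreasing_by
  have := pvRunSplit_length c rest
  simp; omega

def count_repeated_py_alt (s : String) : Int := pvAltGo s.toList

-- ===== PRECONDITION & SPEC =====
def Spec_count_repeated_py (s : String) (out : Int) : Prop := out = count_repeated_py_alt s
instance (s : String) (out : Int) : Decidable (Spec_count_repeated_py s out) := by unfold Spec_count_repeated_py; infer_instance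

-- ===== CLAIM (what is proved, stated in full; the proofs are below) =====
def Claim_equal_count_repeated_py : Prop := ∀ (s : String), Dom_count_repeated_py s → Spec_count_repeated_py s (count_repeated_py s)

-- ===== LEMMAS AND PROOFS =====

-- reference function: number of equal adjacent pairs
def pvAdj : List Char → Int
  | [] => 0
  | [_] => 0
  | a :: b :: t => (if b == a then 1 else 0) + pvAdj (b :: t)

theorem pvAdj_run (xs : List Char) : ∀ c : Char,
    pvAdj (c :: xs) = ((pvRunSplit c xs).1 : Int) + pvAdj (pvRunSplit c xs).2 := by
  induction xs with
  | nil => intro c; simp [pvAdj, pvRunSplit]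
  | cons x xs ih =>
    intro c
    by_cases h : (x == c) = true
    · have hx : x = c := eq_of_beq h
      subst hx
      simp only [pvRunSplit, h, if_pos]
      have := ih x
      simp [pvAdj, this]
      ring
    · have hne : (x == c) = false := by simpa using h
      simp [pvRunSplit, hne, pvAdj]

theorem pvAltGo_eq_adj : ∀ (cs : List Char), pvAltGo cs = pvAdj cs := by
  intro cs
  induction cs using pvAltGo.induct with
  | case1 => simp [pvAltGo, pvAdj]
  | case2 c rest ih =>
    rw [pvAltGo, ih, pvAdj_run]

-- A-side loop characterisation: the index loop computes the adjacent-pair count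
theorem pvFoldA (cs : List Char) : ∀ (a : Char) (acc : Int),
    (PySem.List.pyRange 1 ((a :: cs).length : Int) 1).foldl
      (fun count i =>
        if PySem.List.pyGet? (a :: cs) i == PySem.List.pyGet? (a :: cs) (i - 1) then count + 1
        else count) acc
    = acc + pvAdj (a :: cs) := by
  induction cs with
  | nil =>
    intro a acc
    rw [PySem.List.pyRange_one_eq_nil (by simp)]
    simp [pvAdj]
  | cons b t ih =>
    intro a acc
    have hlen : ((a :: b :: t).length : Int) = (t.length : Int) + 2 := by simp; ring
    rw [hlen, PySem.List.pyRange_one_cons (by omega)]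
    simp only [List.foldl_cons]
    have h1 : PySem.List.pyGet? (a :: b :: t) 1 = some b := by
      simp
    have h0 : PySem.List.pyGet? (a :: b :: t) (1 - 1) = some a := by
      norm_num [PySem.List.pyGet?_zero_cons]
    rw [h1, h0]
    -- shift the tail fold from (a :: b :: t) over [2, |t|+2) to (b :: t) over [1, |t|+1)
    have hshift :
        PySem.List.pyRange (1 + 1) ((t.length : Int) + 2) 1
          = (PySem.List.pyRange 1 ((t.length : Int) + 1) 1).map (fun i => i + 1) := by
      rw [PySem.List.pyRange_one, PySem.List.pyRange_one]
      have he : ((t.length : Int) + 2 - (1 + 1)).toNat = ((t.length : Int) + 1 - 1).toNat := by omega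
      rw [he, List.map_map]
      apply List.map_congr_left
      intro k _
      simp; ring
    rw [hshift, List.foldl_map]
    have hcongr := PySem.List.foldl_congr_mem
      (l := PySem.List.pyRange 1 ((t.length : Int) + 1) 1)
      (init := if (some b == some a) = true then acc + 1 else acc)
      (f := fun (count : Int) i =>
        if PySem.List.pyGet? (a :: b :: t) (i + 1) == PySem.List.pyGet? (a :: b :: t) (i + 1 - 1)
        then count + 1 else count)
      (g := fun (count : Int) i =>
        if PySem.List.pyGet? (b :: t) i == PySem.List.pyGet? (b :: t) (i - 1) then count + 1
        else count)
      (by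
        intro count i hi
        rw [PySem.List.mem_pyRange_one] at hi
        obtain ⟨hi1, hi2⟩ := hi
        obtain ⟨m, hm⟩ : ∃ m : ℕ, i = (m : Int) + 1 := ⟨(i - 1).toNat, by omega⟩
        have e1 : PySem.List.pyGet? (a :: b :: t) (i + 1) = (b :: t)[m + 1]? := by
          have h : i + 1 = ((m + 2 : ℕ) : Int) := by omega
          rw [h, PySem.List.pyGet?_natCast]
          simp
        have e2 : PySem.List.pyGet? (a :: b :: t) (i + 1 - 1) = (b :: t)[m]? := by
          have h : i + 1 - 1 = ((m + 1 : ℕ) : Int) := by omega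
          rw [h, PySem.List.pyGet?_natCast]
          simp
        have e3 : PySem.List.pyGet? (b :: t) i = (b :: t)[m + 1]? := by
          have h : i = ((m + 1 : ℕ) : Int) := by omega
          rw [h, PySem.List.pyGet?_natCast]
        have e4 : PySem.List.pyGet? (b :: t) (i - 1) = (b :: t)[m]? := by
          have h : i - 1 = ((m : ℕ) : Int) := by omega
          rw [h, PySem.List.pyGet?_natCast]
        simp only []
        rw [e1, e2, e3, e4])
    rw [hcongr]
    have hlen2 : ((b :: t).length : Int) = (t.length : Int) + 1 := by simp
    have := ih b (if (some b == some a) = true then acc + 1 else acc)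
    rw [hlen2] at this
    rw [this]
    have hb : ((some b == some a) = true) ↔ ((b == a) = true) := by
      constructor <;> intro hh <;> simpa using hh
    by_cases hba : (b == a) = true
    · simp [pvAdj, hba, hb.mpr hba]
      ring
    · have : (some b == some a) = false := by
        by_contra hc
        exact hba (hb.mp (by simpa using hc))
      simp [pvAdj, hba, this]

theorem pvA_eq_adj (s : String) : count_repeated_py s = pvAdj s.toList := by
  unfold count_repeated_py
  have hget : ∀ i, PySem.Str.pyGet? s i = PySem.List.pyGet? s.toList i := by
    intro i; simp [PySem.Str.pyGet?]
  have hlen : PySem.Str.len s = (s.toList.length : Int) := by simp [PySem.Str.len_eq]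
  rcases hcs : s.toList with _ | ⟨a, cs⟩
  · rw [hlen, hcs]; simp [pvAdj]
  · rw [hlen, hcs]
    by_cases h2 : ((a :: cs).length : Int) < 2
    · rcases cs with _ | ⟨b, t⟩
      · simp [pvAdj]
      · exfalso; simp at h2; omega
    · rw [if_neg h2]
      have hfun :
          (fun (count : Int) i =>
            if PySem.Str.pyGet? s i == PySem.Str.pyGet? s (i - 1) then count + 1 else count)
          = (fun (count : Int) i =>
            if PySem.List.pyGet? (a :: cs) i == PySem.List.pyGet? (a :: cs) (i - 1) then count + 1
            else count) := by
        funext count i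
        rw [hget, hget, hcs]
      rw [hfun]
      exact pvFoldA cs a 0 |>.trans (by ring)

-- ===== VERDICT (by name: the statement is the Claim_ definition above) =====
theorem count_repeated_py_spec : Claim_equal_count_repeated_py := by
  intro s _
  unfold Spec_count_repeated_py count_repeated_py_alt
  rw [pvA_eq_adj, pvAltGo_eq_adj]
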